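-- pv_equiv track=rewrite | github.com/Omer-Omerco/blueprint-extractor | scripts/build_unified_rag.py | _find_best_break
-- ===== SOURCE A (Python) =====
-- def _find_best_break(breaks: list[int], target: int, min_pos: int) -> int:
--     """Find the best break point near target but after min_pos."""
--     candidates = [b for b in breaks if min_pos + 100 < b <= target + 100]
--
--     if not candidates:
--         return target
--
--     before_target = [b for b in candidates if b <= target]
--     if before_target:
--         return max(before_target)
--
--     return min(candidates)
-- ===== SOURCE B (Python) =====
-- def _find_best_break(breaks: list[int], target: int, min_pos: int) -> int:
--     """Sort once, then use the order: scan the sorted breaks from the right for the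
--     largest break <= target (early exit); if it is not past min_pos+100, scan from
--     the left for the smallest break above max(target, min_pos+100)."""
--     lo = min_pos + 100
--     hi = target + 100
--     s = sorted(breaks)
--     for b in reversed(s):
--         if b <= target:
--             if lo < b:
--                 return b
--             break  # largest break <= target is not past lo: no before-target candidate
--     t2 = max(target, lo)
--     for b in s:
--         if t2 < b:
--             return b if b <= hi else target
--     return target
-- ===== Notes on version B (the rewrite author's own statement) =====
-- stated objective: alternative
-- what changed: Sorts the breaks once and exploits the order: a right-to-left scan with early exit finds the largest break <= target (the before-target candidate), and if it is not past min_pos+100 a left-to-right scan finds the smallest break above max(target, min_pos+100); no filtered candidate lists and no max/min calls.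
import Mathlib
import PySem

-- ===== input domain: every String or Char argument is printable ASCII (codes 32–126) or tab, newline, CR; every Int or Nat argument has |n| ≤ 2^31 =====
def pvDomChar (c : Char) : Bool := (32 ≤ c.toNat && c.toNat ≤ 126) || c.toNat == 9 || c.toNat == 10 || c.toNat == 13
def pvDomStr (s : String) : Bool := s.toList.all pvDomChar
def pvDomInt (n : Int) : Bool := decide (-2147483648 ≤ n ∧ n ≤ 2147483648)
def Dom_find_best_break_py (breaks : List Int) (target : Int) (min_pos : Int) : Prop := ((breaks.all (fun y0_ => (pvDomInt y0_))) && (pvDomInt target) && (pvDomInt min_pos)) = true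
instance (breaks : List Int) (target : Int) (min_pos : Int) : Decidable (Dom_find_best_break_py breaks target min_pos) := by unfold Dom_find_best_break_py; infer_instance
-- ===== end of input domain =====

-- B sorts the breaks once and scans the sorted list (right-to-left for the largest break
-- <= target, left-to-right for the smallest break above max(target, min_pos+100)) instead
-- of building filtered candidate lists and calling max/min; objective: alternative.

-- ===== PORT A =====
-- Python max/min raise on an empty list; both calls are guarded nonempty, so `.getD target`
-- is never the default; PySem.List.max?/min? are exact for the builtins here.
def find_best_break_py (breaks : List Int) (target : Int) (min_pos : Int) : Int :=
  let candidates := breaks.filter (fun b => decide (min_pos + 100 < b ∧ b ≤ target + 100))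
  if candidates = [] then target
  else
    let before_target := candidates.filter (fun b => decide (b ≤ target))
    if before_target ≠ [] then (PySem.List.max? before_target (fun y => y)).getD target
    else (PySem.List.min? candidates (fun y => y)).getD target

-- ===== PORT B =====
-- Source B's first loop: first element of the (reversed) list that is <= target, none if the loop falls through
def fbbFirstLe (target : Int) : List Int → Option Int
  | [] => none
  | b :: rest => if b ≤ target then some b else fbbFirstLe target rest

-- Source B's second loop: first element of the list that is > t2, none if the loop falls through
def fbbFirstGt (t2 : Int) : List Int → Option Int
  | [] => none
  | b :: rest => if t2 < b then some b else fbbFirstGt t2 rest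

def find_best_break_py_alt (breaks : List Int) (target : Int) (min_pos : Int) : Int :=
  let lo := min_pos + 100
  let hi := target + 100
  let s := PySem.List.sorted breaks (fun y => y) false
  -- what Source B does after the first loop breaks or falls through
  let t2 := max target lo
  let after :=
    match fbbFirstGt t2 s with
    | some b => if b ≤ hi then b else target
    | none => target
  match fbbFirstLe target s.reverse with
  | some b => if lo < b then b else after
  | none => after

-- ===== PRECONDITION & SPEC =====
def Spec_find_best_break_py (breaks : List Int) (target : Int) (min_pos : Int) (out : Int) : Prop := out = find_best_break_py_alt breaks target min_pos
instance (breaks : List Int) (target : Int) (min_pos : Int) (out : Int) : Decidable (Spec_find_best_break_py breaks target min_pos out) := by unfold Spec_find_best_break_py; infer_instance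

-- ===== CLAIM (what is proved, stated in full; the proofs are below) =====
def Claim_equal_find_best_break_py : Prop := ∀ (breaks : List Int) (target : Int) (min_pos : Int), Dom_find_best_break_py breaks target min_pos → Spec_find_best_break_py breaks target min_pos (find_best_break_py breaks target min_pos)

-- ===== LEMMAS AND PROOFS =====

theorem fbbFirstLe_none (target : Int) : ∀ (l : List Int), fbbFirstLe target l = none → ∀ x ∈ l, target < x := by
  intro l
  induction l with
  | nil => intro _ x hx; simp at hx
  | cons a rest ih =>
    intro h x hx
    by_cases ha : a ≤ target
    · simp [fbbFirstLe, ha] at h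
    · rcases List.mem_cons.mp hx with rfl | hx'
      · omega
      · exact ih (by simpa [fbbFirstLe, ha] using h) x hx'

theorem fbbFirstLe_some (target : Int) : ∀ (l : List Int), l.Pairwise (fun a b => b ≤ a) →
    ∀ b, fbbFirstLe target l = some b → b ∈ l ∧ b ≤ target ∧ ∀ x ∈ l, x ≤ target → x ≤ b := by
  intro l
  induction l with
  | nil => intro _ b h; simp [fbbFirstLe] at h
  | cons a rest ih =>
    intro hpw b h
    rcases List.pairwise_cons.mp hpw with ⟨hhead, htail⟩
    by_cases ha : a ≤ target
    · have hb : a = b := by simpa [fbbFirstLe, ha] using h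
      subst hb
      refine ⟨List.mem_cons_self, ha, ?_⟩
      intro x hx _
      rcases List.mem_cons.mp hx with rfl | hx'
      · exact le_rfl
      · exact hhead x hx'
    · have h' : fbbFirstLe target rest = some b := by simpa [fbbFirstLe, ha] using h
      rcases ih htail b h' with ⟨hbm, hbt, hmax⟩
      refine ⟨List.mem_cons_of_mem a hbm, hbt, ?_⟩
      intro x hx hxle
      rcases List.mem_cons.mp hx with rfl | hx'
      · omega
      · exact hmax x hx' hxle

theorem fbbFirstGt_none (t2 : Int) : ∀ (l : List Int), fbbFirstGt t2 l = none → ∀ x ∈ l, x ≤ t2 := by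
  intro l
  induction l with
  | nil => intro _ x hx; simp at hx
  | cons a rest ih =>
    intro h x hx
    by_cases ha : t2 < a
    · simp [fbbFirstGt, ha] at h
    · rcases List.mem_cons.mp hx with rfl | hx'
      · omega
      · exact ih (by simpa [fbbFirstGt, ha] using h) x hx'

theorem fbbFirstGt_some (t2 : Int) : ∀ (l : List Int), l.Pairwise (fun a b => a ≤ b) →
    ∀ b, fbbFirstGt t2 l = some b → b ∈ l ∧ t2 < b ∧ ∀ x ∈ l, t2 < x → b ≤ x := by
  intro l
  induction l with
  | nil => intro _ b h; simp [fbbFirstGt] at h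
  | cons a rest ih =>
    intro hpw b h
    rcases List.pairwise_cons.mp hpw with ⟨hhead, htail⟩
    by_cases ha : t2 < a
    · have hb : a = b := by simpa [fbbFirstGt, ha] using h
      subst hb
      refine ⟨List.mem_cons_self, ha, ?_⟩
      intro x hx _
      rcases List.mem_cons.mp hx with rfl | hx'
      · exact le_rfl
      · exact hhead x hx'
    · have h' : fbbFirstGt t2 rest = some b := by simpa [fbbFirstGt, ha] using h
      rcases ih htail b h' with ⟨hbm, hbt, hmin⟩
      refine ⟨List.mem_cons_of_mem a hbm, hbt, ?_⟩
      intro x hx hxgt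
      rcases List.mem_cons.mp hx with rfl | hx'
      · omega
      · exact hmin x hx' hxgt

-- ===== VERDICT (by name: the statement is the Claim_ definition above) =====
theorem find_best_break_py_spec : Claim_equal_find_best_break_py := by
  intro breaks target min_pos _
  unfold Spec_find_best_break_py find_best_break_py find_best_break_py_alt
  set lo := min_pos + 100 with hlo
  set hi := target + 100 with hhi
  set s := PySem.List.sorted breaks (fun y => y) false with hs
  have hmem : ∀ x : Int, x ∈ s ↔ x ∈ breaks :=
    fun x => PySem.List.mem_sorted breaks (fun y => y) false x
  have hpw : s.Pairwise (fun a b => a ≤ b) := by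
    simpa using PySem.List.sorted_pairwise breaks (fun y => y)
  have hpwr : s.reverse.Pairwise (fun a b => b ≤ a) := List.pairwise_reverse.mpr hpw
  have hm1 : target ≤ max target lo := le_max_left _ _
  have hm2 : lo ≤ max target lo := le_max_right _ _
  have hm3 : max target lo = target ∨ max target lo = lo := max_choice _ _
  set C := breaks.filter (fun b => decide (lo < b ∧ b ≤ hi)) with hC
  set BT := C.filter (fun b => decide (b ≤ target)) with hBT
  have hmemBT : ∀ x : Int, x ∈ BT ↔ x ∈ breaks ∧ lo < x ∧ x ≤ target := by
    intro x
    constructor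
    · intro hx
      rcases List.mem_filter.mp hx with ⟨hxC, hxle⟩
      rcases List.mem_filter.mp hxC with ⟨hxb, hcond⟩
      simp at hcond hxle
      exact ⟨hxb, hcond.1, hxle⟩
    · intro ⟨hxb, h1, h2⟩
      refine List.mem_filter.mpr ⟨List.mem_filter.mpr ⟨hxb, ?_⟩, by simpa using h2⟩
      simp
      omega
  have hmemC : ∀ x : Int, x ∈ C ↔ x ∈ breaks ∧ lo < x ∧ x ≤ hi := by
    intro x
    constructor
    · intro hx
      rcases List.mem_filter.mp hx with ⟨hxb, hcond⟩
      simp at hcond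
      exact ⟨hxb, hcond⟩
    · intro ⟨hxb, h1, h2⟩
      refine List.mem_filter.mpr ⟨hxb, ?_⟩
      simp
      omega
  rcases hFL : fbbFirstLe target s.reverse with _ | b
  · -- first loop fell through: every break is > target, so BT is empty
    have hall := fbbFirstLe_none target s.reverse hFL
    have hBTnil : BT = [] := by
      rw [List.eq_nil_iff_forall_not_mem]
      intro x hx
      rcases (hmemBT x).mp hx with ⟨hxb, h1, h2⟩
      have := hall x (List.mem_reverse.mpr ((hmem x).mpr hxb))
      omega
    rcases hFG : fbbFirstGt (max target lo) s with _ | m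
    · -- second loop fell through too: no candidate at all
      have hall2 := fbbFirstGt_none (max target lo) s hFG
      have hCnil : C = [] := by
        rw [List.eq_nil_iff_forall_not_mem]
        intro x hx
        rcases (hmemC x).mp hx with ⟨hxb, h1, h2⟩
        have hx1 := hall x (List.mem_reverse.mpr ((hmem x).mpr hxb))
        have hx2 := hall2 x ((hmem x).mpr hxb)
        omega
      simp only [hFL, hFG]
      rw [if_pos hCnil]
    · rcases fbbFirstGt_some (max target lo) s hpw m hFG with ⟨hmm, hmt, hmin⟩
      have hmb : m ∈ breaks := (hmem m).mp hmm
      by_cases hmhi : m ≤ hi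
      · -- A returns min C, which is m
        have hmC : m ∈ C := (hmemC m).mpr ⟨hmb, by omega, hmhi⟩
        have hCne : C ≠ [] := List.ne_nil_of_mem hmC
        rcases hN : PySem.List.min? C (fun y => y) with _ | N
        · exact absurd ((PySem.List.min?_eq_none_iff C (fun y => y)).mp hN) hCne
        · have hNm := PySem.List.min?_mem hN
          have hNmin := PySem.List.min?_isMin hN
          rcases (hmemC N).mp hNm with ⟨hNb, hNlo, hNhi⟩
          have hNt : target < N := hall N (List.mem_reverse.mpr ((hmem N).mpr hNb))
          have h1 : m ≤ N := hmin N ((hmem N).mpr hNb) (by omega)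
          have h2 : N ≤ m := hNmin m hmC
          have hNe : N = m := le_antisymm h2 h1
          rw [if_neg hCne, if_neg (not_not_intro hBTnil), hN, hNe]
          simp only [hFL, hFG]
          rw [if_pos hmhi]
          rfl
      · -- smallest break above max(target, lo) is beyond hi: no candidate
        have hCnil : C = [] := by
          rw [List.eq_nil_iff_forall_not_mem]
          intro x hx
          rcases (hmemC x).mp hx with ⟨hxb, h1, h2⟩
          have hx1 := hall x (List.mem_reverse.mpr ((hmem x).mpr hxb))
          have := hmin x ((hmem x).mpr hxb) (by omega)
          omega
        simp only [hFL, hFG]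
        rw [if_pos hCnil, if_neg hmhi]
  · rcases fbbFirstLe_some target s.reverse hpwr b hFL with ⟨hbm, hbt, hmax⟩
    have hbmem : b ∈ breaks := (hmem b).mp (List.mem_reverse.mp hbm)
    by_cases hblo : lo < b
    · -- before-target candidate exists; A returns max BT, which is b
      have hbBT : b ∈ BT := (hmemBT b).mpr ⟨hbmem, hblo, hbt⟩
      have hBTne : BT ≠ [] := List.ne_nil_of_mem hbBT
      have hCne : C ≠ [] := by
        intro hc
        rw [hBT, hc] at hbBT
        simp at hbBT
      rcases hM : PySem.List.max? BT (fun y => y) with _ | M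
      · exact absurd ((PySem.List.max?_eq_none_iff BT (fun y => y)).mp hM) hBTne
      · have hMm := PySem.List.max?_mem hM
        have hMmax := PySem.List.max?_isMax hM
        rcases (hmemBT M).mp hMm with ⟨hMb, hMlo, hMt⟩
        have h1 : M ≤ b := hmax M (List.mem_reverse.mpr ((hmem M).mpr hMb)) hMt
        have h2 : b ≤ M := hMmax b hbBT
        have hMe : M = b := le_antisymm h1 h2
        rw [if_neg hCne, if_pos hBTne, hM, hMe]
        simp only [hFL]
        rw [if_pos hblo]
        rfl
    · -- the largest break <= target is not past lo: BT is empty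
      have hBTnil : BT = [] := by
        rw [List.eq_nil_iff_forall_not_mem]
        intro x hx
        rcases (hmemBT x).mp hx with ⟨hxb, h1, h2⟩
        have := hmax x (List.mem_reverse.mpr ((hmem x).mpr hxb)) h2
        omega
      rcases hFG : fbbFirstGt (max target lo) s with _ | m
      · -- no break above max(target, lo): no candidate
        have hall2 := fbbFirstGt_none (max target lo) s hFG
        have hCnil : C = [] := by
          rw [List.eq_nil_iff_forall_not_mem]
          intro x hx
          rcases (hmemC x).mp hx with ⟨hxb, h1, h2⟩
          have hx2 := hall2 x ((hmem x).mpr hxb)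
          by_cases hxt : x ≤ target
          · have : x ∈ BT := (hmemBT x).mpr ⟨hxb, h1, hxt⟩
            rw [hBTnil] at this
            simp at this
          · omega
        simp only [hFL, hFG]
        rw [if_pos hCnil, if_neg hblo]
      · rcases fbbFirstGt_some (max target lo) s hpw m hFG with ⟨hmm, hmt, hmin⟩
        have hmb : m ∈ breaks := (hmem m).mp hmm
        by_cases hmhi : m ≤ hi
        · -- A returns min C, which is m
          have hmC : m ∈ C := (hmemC m).mpr ⟨hmb, by omega, hmhi⟩
          have hCne : C ≠ [] := List.ne_nil_of_mem hmC
          rcases hN : PySem.List.min? C (fun y => y) with _ | N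
          · exact absurd ((PySem.List.min?_eq_none_iff C (fun y => y)).mp hN) hCne
          · have hNm := PySem.List.min?_mem hN
            have hNmin := PySem.List.min?_isMin hN
            rcases (hmemC N).mp hNm with ⟨hNb, hNlo, hNhi⟩
            have hNt : ¬ N ≤ target := by
              intro hNt
              have : N ∈ BT := (hmemBT N).mpr ⟨hNb, hNlo, hNt⟩
              rw [hBTnil] at this
              simp at this
            have h1 : m ≤ N := hmin N ((hmem N).mpr hNb) (by omega)
            have h2 : N ≤ m := hNmin m hmC
            have hNe : N = m := le_antisymm h2 h1
            rw [if_neg hCne, if_neg (not_not_intro hBTnil), hN, hNe]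
            simp only [hFL, hFG]
            rw [if_neg hblo, if_pos hmhi]
            rfl
        · -- smallest break above max(target, lo) is beyond hi: no candidate
          have hCnil : C = [] := by
            rw [List.eq_nil_iff_forall_not_mem]
            intro x hx
            rcases (hmemC x).mp hx with ⟨hxb, h1, h2⟩
            by_cases hxt : x ≤ target
            · have : x ∈ BT := (hmemBT x).mpr ⟨hxb, h1, hxt⟩
              rw [hBTnil] at this
              simp at this
            · have := hmin x ((hmem x).mpr hxb) (by omega)
              omega
          simp only [hFL, hFG]
          rw [if_pos hCnil, if_neg hblo, if_neg hmhi]
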